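-- pv_equiv track=rewrite | github.com/andrew-kudrenko/university-labs | s_help_18_11_2020.py | get_diagonal_indices
-- ===== SOURCE A (Python) =====
-- def invert_tuple(pair):
--     return pair[1], pair[0]
--
-- def reflect_triangle(triangle):
--     reflected = []
--
--     for group in triangle:
--         reflected.append(list(map(lambda t: invert_tuple(t), group)))
--
--     return reflected
--
-- def get_diagonal_indices(matrix):
--     indices = []
--
--     rows = len(matrix)
--     cols = len(matrix[0])
--
--     for row in range(rows - 1, -1, -1):
--         group = []
--
--         for col in range(cols - row):
--             group.append((col, row + col))
--
--         indices.append(group)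
--
--     indices += reversed(reflect_triangle(indices[:-1]))
--
--     return indices
-- ===== SOURCE B (Python) =====
-- def get_diagonal_indices(matrix):
--     rows = len(matrix)
--     cols = len(matrix[0])
--     result = []
--     for d in range(rows - 1, -rows, -1):
--         if d >= 0:
--             result.append([(i, i + d) for i in range(cols - d)])
--         else:
--             result.append([(i - d, i) for i in range(cols + d)])
--     return result
-- ===== Notes on version B (the rewrite author's own statement) =====
-- stated objective: simpler
-- what changed: One direct pass over all 2*rows-1 diagonal offsets computing each group from its offset, replacing A's build-upper-triangle then reflect-reverse-and-concatenate decomposition.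
import Mathlib
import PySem

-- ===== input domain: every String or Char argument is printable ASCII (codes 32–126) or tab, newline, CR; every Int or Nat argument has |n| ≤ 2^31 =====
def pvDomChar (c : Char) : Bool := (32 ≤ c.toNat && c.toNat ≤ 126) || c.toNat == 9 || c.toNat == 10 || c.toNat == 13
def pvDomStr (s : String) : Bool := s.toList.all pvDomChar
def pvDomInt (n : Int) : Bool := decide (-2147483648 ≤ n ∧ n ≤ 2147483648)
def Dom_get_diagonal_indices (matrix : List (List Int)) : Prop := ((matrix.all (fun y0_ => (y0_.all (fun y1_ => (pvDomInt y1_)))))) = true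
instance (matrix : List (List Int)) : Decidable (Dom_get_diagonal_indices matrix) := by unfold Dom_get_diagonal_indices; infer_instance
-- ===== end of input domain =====

-- B replaces A's build-upper-triangle / reflect / reverse / concatenate decomposition by one
-- direct pass over the 2*rows-1 diagonal offsets, computing each group from its offset (simpler).

-- ===== PORT A =====
def invert_tuple (pair : Int × Int) : Int × Int := (pair.2, pair.1)

def reflect_triangle (triangle : List (List (Int × Int))) : List (List (Int × Int)) :=
  triangle.foldl (fun reflected group => reflected ++ [group.map (fun t => invert_tuple t)]) []

def get_diagonal_indices (matrix : List (List Int)) : List (List (Int × Int)) :=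
  let rows : Int := matrix.length
  let cols : Int := ((PySem.List.pyGet? matrix 0).getD []).length
  let indices : List (List (Int × Int)) :=
    (PySem.List.pyRange (rows - 1) (-1) (-1)).foldl
      (fun indices row =>
        let group := (PySem.List.pyRange 0 (cols - row) 1).foldl
          (fun group col => group ++ [(col, row + col)]) []
        indices ++ [group]) []
  indices ++ (reflect_triangle (PySem.List.slice indices none (some (-1)))).reverse

-- ===== PORT B =====
def get_diagonal_indices_alt (matrix : List (List Int)) : List (List (Int × Int)) :=
  let rows : Int := matrix.length
  let cols : Int := ((PySem.List.pyGet? matrix 0).getD []).length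
  (PySem.List.pyRange (rows - 1) (-rows) (-1)).foldl
    (fun result d =>
      result ++ [if 0 ≤ d then
          (PySem.List.pyRange 0 (cols - d) 1).map (fun i => (i, i + d))
        else
          (PySem.List.pyRange 0 (cols + d) 1).map (fun i => (i - d, i))]) []

-- ===== PRECONDITION & SPEC =====
-- Pre_ excludes only the empty matrix, on which Python A raises IndexError at matrix[0].
def Pre_get_diagonal_indices (matrix : List (List Int)) : Prop := matrix ≠ []
instance (matrix : List (List Int)) : Decidable (Pre_get_diagonal_indices matrix) := by
  unfold Pre_get_diagonal_indices; infer_instance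

def pvWitness_get_diagonal_indices : List (List Int) := [[1, 2], [3, 4]]

def Spec_get_diagonal_indices (matrix : List (List Int)) (out : List (List (Int × Int))) : Prop := out = get_diagonal_indices_alt matrix
instance (matrix : List (List Int)) (out : List (List (Int × Int))) : Decidable (Spec_get_diagonal_indices matrix out) := by unfold Spec_get_diagonal_indices; infer_instance

-- ===== CLAIM (what is proved, stated in full; the proofs are below) =====
def Claim_equal_get_diagonal_indices : Prop := ∀ (matrix : List (List Int)), Dom_get_diagonal_indices matrix → Pre_get_diagonal_indices matrix → Spec_get_diagonal_indices matrix (get_diagonal_indices matrix)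

-- ===== LEMMAS AND PROOFS =====

lemma key (r c : Nat) (hr : 1 ≤ r) :
    (let indices : List (List (Int × Int)) :=
      (PySem.List.pyRange ((r:Int) - 1) (-1) (-1)).foldl
        (fun indices row =>
          let group := (PySem.List.pyRange 0 ((c:Int) - row) 1).foldl
            (fun group col => group ++ [(col, row + col)]) []
          indices ++ [group]) []
     indices ++ (reflect_triangle (PySem.List.slice indices none (some (-1)))).reverse)
    = (PySem.List.pyRange ((r:Int) - 1) (-(r:Int)) (-1)).foldl
        (fun result d =>
          result ++ [if 0 ≤ d then
              (PySem.List.pyRange 0 ((c:Int) - d) 1).map (fun i => (i, i + d))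
            else
              (PySem.List.pyRange 0 ((c:Int) + d) 1).map (fun i => (i - d, i))]) [] := by
  simp only [reflect_triangle, PySem.List.foldl_append_singleton_eq_map, List.nil_append,
    PySem.List.slice_to_neg_one, PySem.List.pyRange_neg_one]
  have hr1 : ((r:Int) - 1 - -1).toNat = r := by omega
  have hr2 : ((r:Int) - 1 - -(r:Int)).toNat = 2*r - 1 := by omega
  rw [hr1, hr2]
  simp only [List.map_map]
  apply List.ext_getElem
  · simp only [List.length_append, List.length_reverse, List.length_map, List.length_dropLast,
      List.length_range]
    omega
  · intro i h1 h2
    simp only [List.length_append, List.length_reverse, List.length_map, List.length_dropLast,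
      List.length_range] at h1 h2
    by_cases hi : i < r
    · rw [List.getElem_append_left (by simp; omega)]
      simp only [List.getElem_map, List.getElem_range, Function.comp_apply]
      rw [if_pos (by omega)]
      simp only [List.map_inj_left]
      intro x hx
      simp [Int.add_comm]
    · rw [List.getElem_append_right (by simp; omega)]
      simp only [List.getElem_reverse, List.getElem_map, List.length_map, List.length_dropLast,
        List.length_range, List.getElem_dropLast, List.getElem_range, Function.comp_apply]
      rw [if_neg (by omega)]
      have harg : (r:Int) - 1 - ↑(r - 1 - 1 - (i - r)) = -((r:Int) - 1 - (i:Int)) := by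
        omega
      rw [harg]
      have harg2 : (c:Int) - -((r:Int) - 1 - (i:Int)) = (c:Int) + ((r:Int) - 1 - (i:Int)) := by ring
      rw [harg2]
      simp only [List.map_map, List.map_inj_left]
      intro x hx
      simp [invert_tuple]
      ring

-- ===== VERDICT (by name: the statement is the Claim_ definition above) =====
theorem get_diagonal_indices_spec : Claim_equal_get_diagonal_indices := by
  intro matrix _ hpre
  have hr : 1 ≤ matrix.length := List.length_pos_of_ne_nil hpre
  show get_diagonal_indices matrix = get_diagonal_indices_alt matrix
  exact key matrix.length ((PySem.List.pyGet? matrix 0).getD []).length hr
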